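-- pv_equiv track=rewrite | github.com/tohojo/flent | netperf_wrapper/formatters.py | _filter_dup_vals
-- ===== SOURCE A (Python) =====
-- def _filter_dup_vals(x_vals, y_vals):
--     """Filter out series of identical y-vals, also removing the corresponding x-vals.
--
--     Lowers the amount of plotted points and avoids strings of markers on CDFs."""
--     x_vals = list(x_vals)
--     y_vals = list(y_vals)
--     i = 0
--     while i < len(x_vals)-2:
--         while y_vals[i] == y_vals[i+1] and y_vals[i] == y_vals[i+2]:
--             del x_vals[i+1]
--             del y_vals[i+1]
--         i +=1
--     return x_vals,y_vals
-- ===== SOURCE B (Python) =====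
-- def _filter_dup_vals(x_vals, y_vals):
--     """Filter out series of identical y-vals, also removing the corresponding x-vals.
--
--     Lowers the amount of plotted points and avoids strings of markers on CDFs."""
--     pts = list(zip(x_vals, y_vals))
--     out = []
--     j = 0
--     n = len(pts)
--     while j < n:
--         # find the end of the run of equal y-values starting at j
--         k = j + 1
--         while k < n and pts[k][1] == pts[j][1]:
--             k += 1
--         out.append(pts[j])
--         if k - j >= 2:
--             out.append(pts[k - 1])
--         j = k
--     return [p[0] for p in out], [p[1] for p in out]
-- ===== Notes on version B (the rewrite author's own statement) =====
-- stated objective: alternative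
-- what changed: Instead of repeatedly deleting middle elements in place with nested while loops (each del shifts the tail), B makes a single pass over the zipped points, detecting each maximal run of equal y-values and emitting only its first and last point.
-- outside the precondition, e.g. on _filter_dup_vals([1, 2], [5, 5, 5]): A returns ([1, 2], [5, 5, 5]), B returns ([1, 2], [5, 5])
import Mathlib
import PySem

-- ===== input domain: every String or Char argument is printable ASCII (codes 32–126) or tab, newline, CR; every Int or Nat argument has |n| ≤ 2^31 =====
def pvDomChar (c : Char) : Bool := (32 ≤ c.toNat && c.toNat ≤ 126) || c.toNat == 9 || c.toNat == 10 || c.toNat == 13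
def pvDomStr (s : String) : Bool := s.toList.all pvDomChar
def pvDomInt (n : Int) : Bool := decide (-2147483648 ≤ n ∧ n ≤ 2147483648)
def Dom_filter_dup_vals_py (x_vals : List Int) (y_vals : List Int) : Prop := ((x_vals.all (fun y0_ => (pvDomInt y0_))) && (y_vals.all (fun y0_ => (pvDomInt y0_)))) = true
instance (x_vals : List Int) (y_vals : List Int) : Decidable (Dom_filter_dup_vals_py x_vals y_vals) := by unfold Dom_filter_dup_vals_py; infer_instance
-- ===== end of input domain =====

-- B replaces A's nested in-place `del` loops by a single pass that keeps the first and
-- last point of each maximal run of equal y-values; the equivalence is about the return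
-- value (A copies its arguments, so neither version mutates the caller's lists).


-- ===== PORT A =====
-- `del l[i]` for a Nat index: exact for 0 ≤ i (none = IndexError)
def pydel? {α : Type} (l : List α) (i : Nat) : Option (List α) :=
  if i < l.length then some (l.eraseIdx i) else none

-- the inner `while y_vals[i] == y_vals[i+1] and y_vals[i] == y_vals[i+2]: del x_vals[i+1]; del y_vals[i+1]`
-- (none = an index access or `del` raised IndexError)
def aInner (i : Nat) (xs ys : List Int) : Option (List Int × List Int) :=
  match PySem.List.pyGet? ys (i : Int), PySem.List.pyGet? ys ((i : Int) + 1) with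
  | some a, some b =>
    if a = b then
      match PySem.List.pyGet? ys ((i : Int) + 2) with
      | some c =>
        if a = c then
          match pydel? xs (i + 1), hy : pydel? ys (i + 1) with
          | some xs', some ys' => aInner i xs' ys'
          | _, _ => none
        else some (xs, ys)
      | none => none
    else some (xs, ys)
  | _, _ => none
termination_by ys.length
decreasing_by
  simp only [pydel?] at hy
  split at hy
  · rename_i hlt
    cases hy
    simp only [List.length_eraseIdx, hlt, if_pos]
    omega
  · simp at hy

-- used by aOuter's decreasing_by (the inner loop never lengthens the lists)
theorem aInner_length_le (i : Nat) (xs ys : List Int) :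
    ∀ xs' ys', aInner i xs ys = some (xs', ys') → xs'.length ≤ xs.length := by
  induction xs, ys using aInner.induct (i := i) <;>
    (intro xs' ys' h; rw [aInner] at h; simp_all [pydel?])
  rename_i c hget2 xs0 ys0 hy hx hget1 hget0 ih
  rw [if_pos hy.1] at h
  simp only [hy.2] at h
  exact (ih _ _ h).trans (by rw [← hx.2, List.length_eraseIdx]; split <;> omega)

-- the outer `while i < len(x_vals)-2: …; i += 1`  (i + 2 < len ↔ i < len - 2 over ℤ since i ≥ 0)
def aOuter (i : Nat) (xs ys : List Int) : Option (List Int × List Int) :=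
  if i + 2 < xs.length then
    match h : aInner i xs ys with
    | some (xs', ys') => aOuter (i + 1) xs' ys'
    | none => none
  else some (xs, ys)
termination_by xs.length - i
decreasing_by
  have := aInner_length_le i xs ys xs' ys' h
  omega

-- A raises IndexError exactly where aOuter returns none; those inputs are excluded by
-- Pre_filter_dup_vals_py, so the .getD default is never the claimed value.
def filter_dup_vals_py (x_vals : List Int) (y_vals : List Int) : List Int × List Int :=
  (aOuter 0 x_vals y_vals).getD (x_vals, y_vals)

-- ===== PORT B =====
-- one pass over the zipped points: emit the first point of each maximal run of equal
-- y-values, plus its last point when the run has length ≥ 2 (Source B's j/k scan)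
def bRun : List (Int × Int) → List (Int × Int)
  | [] => []
  | p :: rest =>
    let run := rest.takeWhile (fun q => q.2 == p.2)
    let rest' := rest.dropWhile (fun q => q.2 == p.2)
    match run.getLast? with
    | some q => p :: q :: bRun rest'
    | none => p :: bRun rest'
termination_by l => l.length
decreasing_by
  have := List.length_dropWhile_le (fun q => q.2 == p.2) rest
  simp; omega

def filter_dup_vals_py_alt (x_vals : List Int) (y_vals : List Int) : List Int × List Int :=
  let out := bRun (x_vals.zip y_vals)
  (out.map Prod.fst, out.map Prod.snd)

-- ===== PRECONDITION & SPEC =====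
-- Pre_ excludes (a) inputs whose last three y-values are equal, on which A raises
-- IndexError, and (b) inputs with len(x_vals) ≠ len(y_vals), malformed for this
-- point-series task, on which A either raises or returns an accidental partial result.
def Pre_filter_dup_vals_py (x_vals : List Int) (y_vals : List Int) : Prop :=
  x_vals.length = y_vals.length ∧
  ¬ (3 ≤ y_vals.length ∧
     PySem.List.pyGet? y_vals (-3) = PySem.List.pyGet? y_vals (-1) ∧
     PySem.List.pyGet? y_vals (-2) = PySem.List.pyGet? y_vals (-1))
instance (x_vals : List Int) (y_vals : List Int) : Decidable (Pre_filter_dup_vals_py x_vals y_vals) := by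
  unfold Pre_filter_dup_vals_py; infer_instance

def pvWitness_filter_dup_vals_py : List Int × List Int := ([1, 2, 3, 4], [5, 5, 5, 6])

def Spec_filter_dup_vals_py (x_vals : List Int) (y_vals : List Int) (out : List Int × List Int) : Prop :=
  out = filter_dup_vals_py_alt x_vals y_vals
instance (x_vals : List Int) (y_vals : List Int) (out : List Int × List Int) : Decidable (Spec_filter_dup_vals_py x_vals y_vals out) := by
  unfold Spec_filter_dup_vals_py; infer_instance

-- ===== CLAIM (what is proved, stated in full; the proofs are below) =====
def Claim_equal_filter_dup_vals_py : Prop := ∀ (x_vals : List Int) (y_vals : List Int), Dom_filter_dup_vals_py x_vals y_vals → Pre_filter_dup_vals_py x_vals y_vals → Spec_filter_dup_vals_py x_vals y_vals (filter_dup_vals_py x_vals y_vals)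

-- ===== LEMMAS AND PROOFS =====

theorem pvEraseIdxAppend {α : Type} (p : List α) (l : List α) (n : Nat) :
    (p ++ l).eraseIdx (p.length + n) = p ++ l.eraseIdx n := by
  induction p with
  | nil => simp
  | cons x xs ih => simpa [Nat.succ_add] using ih

theorem pvZipReplicate (l : List Int) (a : Int) :
    l.zip (List.replicate l.length a) = l.map (fun x => (x, a)) := by
  induction l with
  | nil => rfl
  | cons x xs ih =>
    show (x :: xs).zip (List.replicate (xs.length + 1) a) = _
    rw [List.replicate_succ]
    simpa using ih

theorem pvTakeWhileRun (a : Int) (ps qs : List (Int × Int))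
    (hp : ∀ p ∈ ps, p.2 = a) (hq : ∀ q ∈ qs.head?, q.2 ≠ a) :
    (ps ++ qs).takeWhile (fun q => q.2 == a) = ps ∧
    (ps ++ qs).dropWhile (fun q => q.2 == a) = qs := by
  induction ps with
  | nil =>
    cases qs with
    | nil => simp
    | cons q qt =>
      have : q.2 ≠ a := hq q (by simp)
      simp [List.takeWhile, List.dropWhile, this]
  | cons p pt ih =>
    have h2 : p.2 = a := hp p (by simp)
    have := ih (fun x hx => hp x (by simp [hx]))
    simp [List.takeWhile, List.dropWhile, h2, this.1, this.2]

theorem pvGetAppend (py : List Int) (a : Int) (t : List Int) (i : Nat) (hpy : py.length = i) :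
    PySem.List.pyGet? (py ++ a :: t) (i : Int) = some a := by
  subst hpy; exact PySem.List.pyGet?_append_length py t a

theorem pvGetAppend1 (py : List Int) (a b : Int) (t : List Int) (i : Nat) (hpy : py.length = i) :
    PySem.List.pyGet? (py ++ a :: b :: t) ((i : Int) + 1) = some b := by
  have h : py ++ a :: b :: t = (py ++ [a]) ++ b :: t := by simp
  have hl : ((i : Int) + 1) = ((py ++ [a]).length : Int) := by simp [hpy]
  rw [h, hl]
  exact PySem.List.pyGet?_append_length (py ++ [a]) t b

theorem pvGetAppend2 (py : List Int) (a b c : Int) (t : List Int) (i : Nat) (hpy : py.length = i) :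
    PySem.List.pyGet? (py ++ a :: b :: c :: t) ((i : Int) + 2) = some c := by
  have h : py ++ a :: b :: c :: t = (py ++ [a, b]) ++ c :: t := by simp
  have hl : ((i : Int) + 2) = ((py ++ [a, b]).length : Int) := by simp [hpy]
  rw [h, hl]
  exact PySem.List.pyGet?_append_length (py ++ [a, b]) t c

theorem pvInnerNoop (i : Nat) (xsAll py : List Int) (a b : Int) (t : List Int)
    (hpy : py.length = i) (hab : a ≠ b) :
    aInner i xsAll (py ++ a :: b :: t) = some (xsAll, py ++ a :: b :: t) := by
  rw [aInner]
  rw [pvGetAppend py a (b :: t) i hpy, pvGetAppend1 py a b t i hpy]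
  simp [hab]

theorem pvInnerCollapse : ∀ (k : Nat), 1 ≤ k → ∀ (i : Nat) (px py xs t : List Int) (x0 a d : Int),
    px.length = i → py.length = i → d ≠ a → k ≤ xs.length →
    aInner i (px ++ x0 :: xs) (py ++ a :: (List.replicate k a ++ d :: t)) =
      some (px ++ x0 :: xs.drop (k - 1), py ++ a :: a :: d :: t) := by
  intro k
  induction k with
  | zero => omega
  | succ k ih =>
    intro _ i px py xs t x0 a d hpx hpy hda hk
    rw [aInner]
    rw [List.replicate_succ]
    simp only [List.cons_append]
    rw [pvGetAppend py a _ i hpy, pvGetAppend1 py a a _ i hpy]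
    simp only [if_pos rfl]
    cases k with
    | zero =>
      rw [show List.replicate 0 a ++ d :: t = d :: t by simp] at *
      rw [pvGetAppend2 py a a d t i hpy]
      simp [Ne.symm hda]
    | succ k' =>
      rw [List.replicate_succ]
      simp only [List.cons_append]
      rw [pvGetAppend2 py a a a _ i hpy]
      simp only [if_pos rfl]
      obtain ⟨x1, xs1, rfl⟩ : ∃ x1 xs1, xs = x1 :: xs1 := by
        cases xs with
        | nil => simp at hk
        | cons u v => exact ⟨u, v, rfl⟩
      have hdelx : pydel? (px ++ x0 :: x1 :: xs1) (i + 1) = some (px ++ x0 :: xs1) := by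
        have h1 : i + 1 < (px ++ x0 :: x1 :: xs1).length := by
          simp only [List.length_append, List.length_cons, List.length_nil]; omega
        unfold pydel?
        rw [if_pos h1, show i + 1 = px.length + 1 from by omega, pvEraseIdxAppend]
        rfl
      have hdely : pydel? (py ++ a :: a :: a :: (List.replicate k' a ++ d :: t)) (i + 1) =
          some (py ++ a :: a :: (List.replicate k' a ++ d :: t)) := by
        have h1 : i + 1 < (py ++ a :: a :: a :: (List.replicate k' a ++ d :: t)).length := by
          simp only [List.length_append, List.length_cons, List.length_nil]; omega
        unfold pydel?
        rw [if_pos h1, show i + 1 = py.length + 1 from by omega, pvEraseIdxAppend]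
        rfl
      rw [hdelx, hdely]
      have hre : py ++ a :: a :: (List.replicate k' a ++ d :: t) =
          py ++ a :: (List.replicate (k' + 1) a ++ d :: t) := by
        simp [List.replicate_succ]
      rw [hre]
      simp only [if_true]
      change aInner i (px ++ x0 :: xs1) (py ++ a :: (List.replicate (k' + 1) a ++ d :: t)) = _
      rw [ih (by omega) i px py xs1 t x0 a d hpx hpy hda (by simp at hk; omega)]
      simp

theorem pvBRunSmall (l : List (Int × Int)) (h : l.length ≤ 2) : bRun l = l := by
  match l with
  | [] => rw [bRun]
  | [p] => rw [bRun]; simp [bRun]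
  | [p, q] =>
    rw [bRun]
    by_cases hpq : q.2 = p.2
    · simp [List.takeWhile, List.dropWhile, hpq, bRun]
    · have : (q.2 == p.2) = false := by simpa using hpq
      simp [List.takeWhile, List.dropWhile, this, bRun]

theorem pvDropWhileHead (a : Int) : ∀ (l : List Int) (d : Int) (t : List Int),
    l.dropWhile (fun b => b == a) = d :: t → d ≠ a := by
  intro l
  induction l with
  | nil => intro d t h; simp at h
  | cons b bt ih =>
    intro d t h
    by_cases hba : b = a
    · rw [List.dropWhile_cons_of_pos (by simp [hba])] at h
      exact ih d t h
    · rw [List.dropWhile_cons_of_neg (by simp [hba])] at h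
      cases h; exact hba

theorem pvNtTail (c : Int) (l : List Int) (h : ∀ (u : List Int) (a : Int), (c :: l) ≠ u ++ [a, a, a]) :
    ∀ (u : List Int) (a : Int), l ≠ u ++ [a, a, a] := by
  intro u a hl
  exact h (c :: u) a (by simp [hl])

theorem pvBRunRun (x0 a d : Int) (t r' : List Int) (xlast : Int) (xs2 : List Int) (k : Nat)
    (hk : 1 ≤ k) (hr : r'.length = k - 1) (hda : d ≠ a) (hxs2 : xs2.length = t.length + 1) :
    bRun ((x0 :: (r' ++ xlast :: xs2)).zip (a :: (List.replicate k a ++ d :: t))) =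
      (x0, a) :: (xlast, a) :: bRun (xs2.zip (d :: t)) := by
  have hrl : (r' ++ [xlast]).length = k := by simp [hr]; omega
  have hzip : (x0 :: (r' ++ xlast :: xs2)).zip (a :: (List.replicate k a ++ d :: t)) =
      (x0, a) :: (((r' ++ [xlast]).map (fun x => (x, a))) ++ xs2.zip (d :: t)) := by
    have h1 : r' ++ xlast :: xs2 = (r' ++ [xlast]) ++ xs2 := by simp
    have h2 : List.replicate k a = List.replicate (r' ++ [xlast]).length a := by rw [hrl]
    rw [List.zip_cons_cons, h1, h2, List.zip_append (by simp), pvZipReplicate]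
  rw [hzip, bRun]
  obtain ⟨x2, xs2', rfl⟩ : ∃ x2 xs2', xs2 = x2 :: xs2' := by
    cases xs2 with
    | nil => simp at hxs2
    | cons u v => exact ⟨u, v, rfl⟩
  have hrun := pvTakeWhileRun a ((r' ++ [xlast]).map (fun x => (x, a))) ((x2 :: xs2').zip (d :: t))
    (by intro p hp; simp only [List.mem_map] at hp; obtain ⟨x, _, rfl⟩ := hp; rfl)
    (by
      intro q hq
      simp only [List.zip_cons_cons, List.head?_cons, Option.mem_def, Option.some.injEq] at hq
      rw [← hq]; simpa using hda)
  simp only [hrun.1, hrun.2]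
  have hlast : ((r' ++ [xlast]).map (fun x => (x, a))).getLast? = some (xlast, a) := by
    simp
  rw [hlast]

theorem pvMapZip : ∀ (xs ys : List Int), xs.length = ys.length →
    (xs.zip ys).map Prod.fst = xs ∧ (xs.zip ys).map Prod.snd = ys := by
  intro xs
  induction xs with
  | nil => intro ys h; cases ys with
    | nil => simp
    | cons b bt => simp at h
  | cons x xt ih =>
    intro ys h
    cases ys with
    | nil => simp at h
    | cons b bt =>
      simp only [List.length_cons, Nat.add_right_cancel_iff] at h
      have := ih bt h
      simp [List.zip_cons_cons, this.1, this.2]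

theorem pvBRunSingle (x0 a d : Int) (t xs1 : List Int) (hda : d ≠ a)
    (hxs1 : xs1.length = t.length + 1) :
    bRun ((x0 :: xs1).zip (a :: d :: t)) = (x0, a) :: bRun (xs1.zip (d :: t)) := by
  obtain ⟨x1, xs2, rfl⟩ : ∃ x1 xs2, xs1 = x1 :: xs2 := by
    cases xs1 with
    | nil => simp at hxs1
    | cons u v => exact ⟨u, v, rfl⟩
  rw [List.zip_cons_cons, bRun]
  have hrun := pvTakeWhileRun a [] ((x1 :: xs2).zip (d :: t)) (by simp)
    (by
      intro q hq
      simp only [List.zip_cons_cons, List.head?_cons, Option.mem_def, Option.some.injEq] at hq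
      rw [← hq]; simpa using hda)
  simp only [List.nil_append] at hrun
  simp only [hrun.1, hrun.2, List.getLast?_nil]

theorem pvMain : ∀ (n : Nat) (ys xs px py : List Int) (i : Nat),
    ys.length = n → xs.length = n → px.length = i → py.length = i →
    (∀ (u : List Int) (a : Int), ys ≠ u ++ [a, a, a]) →
    aOuter i (px ++ xs) (py ++ ys) =
      some (px ++ (bRun (xs.zip ys)).map Prod.fst, py ++ (bRun (xs.zip ys)).map Prod.snd) := by
  intro n
  induction n using Nat.strong_induction_on with
  | _ n ih =>
  intro ys xs px py i hyn hxn hpx hpy hnt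
  by_cases hsmall : n ≤ 2
  · rw [aOuter, if_neg (by simp only [List.length_append]; omega)]
    have hz : (xs.zip ys).length ≤ 2 := by simp only [List.length_zip]; omega
    rw [pvBRunSmall _ hz, (pvMapZip xs ys (by omega)).1, (pvMapZip xs ys (by omega)).2]
  · -- n ≥ 3
    obtain ⟨a, rest, rfl⟩ : ∃ a rest, ys = a :: rest := by
      cases ys with
      | nil => simp at hyn; omega
      | cons u v => exact ⟨u, v, rfl⟩
    obtain ⟨x0, xs1, rfl⟩ : ∃ x0 xs1, xs = x0 :: xs1 := by
      cases xs with
      | nil => simp at hxn; omega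
      | cons u v => exact ⟨u, v, rfl⟩
    simp only [List.length_cons] at hxn hyn
    have hrest : rest = rest.takeWhile (fun b => b == a) ++ rest.dropWhile (fun b => b == a) :=
      (List.takeWhile_append_dropWhile).symm
    have htw : rest.takeWhile (fun b => b == a) =
        List.replicate (rest.takeWhile (fun b => b == a)).length a := by
      apply List.eq_replicate_of_mem
      intro b hb
      simpa using List.mem_takeWhile_imp hb
    set k := (rest.takeWhile (fun b => b == a)).length with hkdef
    have hntrest := pvNtTail a rest hnt
    match hdw : rest.dropWhile (fun b => b == a) with
    | [] =>
      exfalso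
      have hall : a :: rest = List.replicate n a := by
        rw [hrest, hdw, htw]
        simp only [List.append_nil]
        have hnk : n = k + 1 := by
          have := congrArg List.length hrest
          simp only [hdw, List.append_nil, ← hkdef] at this
          omega
        rw [hnk]
        simp [List.replicate_succ]
      exact hnt (List.replicate (n - 3) a) a (by
        rw [hall, show [a, a, a] = List.replicate 3 a from rfl, ← List.replicate_add]
        congr 1
        omega)
    | d :: t =>
      have hda : d ≠ a := pvDropWhileHead a rest d t hdw
      have hlenrest : rest.length = k + (t.length + 1) := by
        have := congrArg List.length hrest
        simp only [hdw, List.length_append, List.length_cons, ← hkdef] at this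
        omega
      have hrdt : rest = List.replicate k a ++ d :: t := by
        rw [hrest, hdw, htw]
      clear hrest
      rw [hrdt]
      have hntdt : ∀ (u : List Int) (b : Int), d :: t ≠ u ++ [b, b, b] := by
        intro u b hu
        exact hntrest (List.replicate k a ++ u) b (by rw [hrdt, hu]; simp)
      cases Nat.eq_zero_or_pos k with
      | inl hk0 =>
        rw [hk0] at hlenrest ⊢
        simp only [List.replicate_zero, List.nil_append]
        rw [aOuter, if_pos (by simp only [List.length_append, List.length_cons, List.length_nil]; omega)]
        rw [pvInnerNoop i (px ++ x0 :: xs1) py a d t hpy (Ne.symm hda)]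
        change aOuter (i + 1) (px ++ x0 :: xs1) (py ++ a :: d :: t) = _
        rw [show px ++ x0 :: xs1 = (px ++ [x0]) ++ xs1 by simp,
            show py ++ a :: d :: t = (py ++ [a]) ++ d :: t by simp]
        rw [ih (n - 1) (by omega) (d :: t) xs1 (px ++ [x0]) (py ++ [a]) (i + 1)
              (by simp only [List.length_cons]; omega)
              (by omega)
              (by simp [hpx])
              (by simp [hpy])
              hntdt]
        rw [pvBRunSingle x0 a d t xs1 hda (by omega)]
        simp
      | inr hk1 =>
        -- decompose xs1 around the end of the run
        obtain ⟨r', xlast, xs2, hfound, hr'len, hxs2len⟩ :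
            ∃ (r' : List Int) (xlast : Int) (xs2 : List Int),
              xs1 = r' ++ xlast :: xs2 ∧ r'.length = k - 1 ∧ xs2.length = t.length + 1 := by
          have hklt : k - 1 < xs1.length := by omega
          refine ⟨xs1.take (k - 1), xs1[k - 1], xs1.drop k, ?_, by simp; omega, by simp; omega⟩
          have h1 : xs1.drop (k - 1) = xs1[k - 1] :: xs1.drop ((k - 1) + 1) :=
            List.drop_eq_getElem_cons hklt
          have h2 : (k - 1) + 1 = k := by omega
          conv_lhs => rw [← List.take_append_drop (k - 1) xs1]
          rw [h1, h2]
        subst hfound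
        rw [aOuter, if_pos (by simp only [List.length_append, List.length_cons, List.length_nil]; omega)]
        rw [pvInnerCollapse k hk1 i px py (r' ++ xlast :: xs2) t x0 a d hpx hpy hda
              (by simp only [List.length_append, List.length_cons, List.length_nil]; omega)]
        rw [pvBRunRun x0 a d t r' xlast xs2 k hk1 hr'len hda hxs2len]
        change aOuter (i + 1) (px ++ x0 :: (r' ++ xlast :: xs2).drop (k - 1)) (py ++ a :: a :: d :: t) = _
        have hdrop : (r' ++ xlast :: xs2).drop (k - 1) = xlast :: xs2 := by
          rw [← hr'len]; exact List.drop_left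
        rw [hdrop]
        cases t with
        | nil =>
          obtain ⟨x2, rfl⟩ : ∃ x2, xs2 = [x2] := by
            cases xs2 with
            | nil => simp at hxs2len
            | cons u v =>
              cases v with
              | nil => exact ⟨u, rfl⟩
              | cons w ws => simp at hxs2len
          rw [aOuter, if_neg (by simp only [List.length_append, List.length_cons, List.length_nil]; omega)]
          rw [pvBRunSmall ([x2].zip [d]) (by simp)]
          simp
        | cons e t' =>
          simp only [List.length_cons] at hxs2len hlenrest
          rw [aOuter, if_pos (by simp only [List.length_append, List.length_cons, List.length_nil]; omega)]
          rw [show py ++ a :: a :: d :: e :: t' = (py ++ [a]) ++ a :: d :: e :: t' by simp]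
          rw [pvInnerNoop (i + 1) (px ++ x0 :: xlast :: xs2) (py ++ [a]) a d (e :: t')
                (by simp [hpy]) (Ne.symm hda)]
          change aOuter (i + 1 + 1) (px ++ x0 :: xlast :: xs2) ((py ++ [a]) ++ a :: d :: e :: t') = _
          rw [show px ++ x0 :: xlast :: xs2 = (px ++ [x0, xlast]) ++ xs2 by simp,
              show (py ++ [a]) ++ a :: d :: e :: t' = (py ++ [a, a]) ++ d :: e :: t' by simp]
          rw [ih (t'.length + 2) (by omega) (d :: e :: t') xs2 (px ++ [x0, xlast]) (py ++ [a, a]) (i + 2)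
                (by simp) (by omega) (by simp [hpx]) (by simp [hpy]) hntdt]
          simp

theorem main_equiv (x_vals y_vals : List Int)
    (hlen : x_vals.length = y_vals.length)
    (hnt : ∀ (u : List Int) (a : Int), y_vals ≠ u ++ [a, a, a]) :
    aOuter 0 x_vals y_vals =
      some ((bRun (x_vals.zip y_vals)).map Prod.fst, (bRun (x_vals.zip y_vals)).map Prod.snd) := by
  have := pvMain y_vals.length y_vals x_vals [] [] 0 rfl hlen rfl rfl hnt
  simpa using this

theorem pre_noTail3 (x_vals y_vals : List Int) (h : Pre_filter_dup_vals_py x_vals y_vals) :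
    ∀ (u : List Int) (a : Int), y_vals ≠ u ++ [a, a, a] := by
  intro u a hy
  apply h.2
  subst hy
  have hlen : (u ++ [a, a, a]).length = u.length + 3 := by simp
  refine ⟨by omega, ?_, ?_⟩
  · rw [PySem.List.pyGet?_neg_ofNat (u ++ [a, a, a]) 3 (by omega) (by omega),
        PySem.List.pyGet?_neg_one]
    simp [hlen, List.getElem?_append_right]
  · rw [PySem.List.pyGet?_neg_ofNat (u ++ [a, a, a]) 2 (by omega) (by omega),
        PySem.List.pyGet?_neg_one]
    simp [hlen, List.getElem?_append_right]

-- ===== VERDICT (by name: the statement is the Claim_ definition above) =====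
theorem filter_dup_vals_py_spec : Claim_equal_filter_dup_vals_py := by
  intro x y _ hpre
  unfold Spec_filter_dup_vals_py filter_dup_vals_py filter_dup_vals_py_alt
  rw [main_equiv x y hpre.1 (pre_noTail3 x y hpre)]
  rfl
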